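-- pv_equiv track=rewrite | github.com/eatbas/on-prem-ai-note-taker | backend/app/services/speaker_summary_service.py | _parse_enhanced_summary
-- ===== SOURCE A (Python) =====
-- from typing import Dict, Any, List, Optional
--
-- def _parse_enhanced_summary(summary_text: str) -> Dict[str, Any]:
--     """Parse the enhanced summary into structured components"""
--
--     # Basic parsing - in a production system, you might want more sophisticated parsing
--     sections = {}
--     current_section = None
--     current_content = []
--
--     for line in summary_text.split('\n'):
--         line = line.strip()
--         if line.startswith('##'):
--             # Save previous section
--             if current_section:
--                 sections[current_section] = '\n'.join(current_content)
--
--             # Start new section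
--             current_section = line.replace('##', '').strip().lower().replace(' ', '_')
--             current_content = []
--         elif line and current_section:
--             current_content.append(line)
--
--     # Save last section
--     if current_section:
--         sections[current_section] = '\n'.join(current_content)
--
--     return sections
-- ===== SOURCE B (Python) =====
-- def _parse_enhanced_summary(summary_text: str):
--     """Parse the enhanced summary into structured components (segment-by-segment scan)."""
--     lines = [line.strip() for line in summary_text.split('\n')]
--     n = len(lines)
--     sections = {}
--     i = 0
--     while i < n:
--         if not lines[i].startswith('##'):
--             i += 1
--             continue
--         key = lines[i].replace('##', '').strip().lower().replace(' ', '_')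
--         j = i + 1
--         while j < n and not lines[j].startswith('##'):
--             j += 1
--         if key:
--             sections[key] = '\n'.join(l for l in lines[i + 1:j] if l)
--         i = j
--     return sections
-- ===== Notes on version B (the rewrite author's own statement) =====
-- stated objective: alternative
-- what changed: Replaced A's per-line accumulating state machine (current section + pending content buffer, flushed at each header and at EOF) by a two-pointer segment scan: find each header line, locate the next header with an inner scan, and build that section's entry directly from the slice between them.
import Mathlib
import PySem

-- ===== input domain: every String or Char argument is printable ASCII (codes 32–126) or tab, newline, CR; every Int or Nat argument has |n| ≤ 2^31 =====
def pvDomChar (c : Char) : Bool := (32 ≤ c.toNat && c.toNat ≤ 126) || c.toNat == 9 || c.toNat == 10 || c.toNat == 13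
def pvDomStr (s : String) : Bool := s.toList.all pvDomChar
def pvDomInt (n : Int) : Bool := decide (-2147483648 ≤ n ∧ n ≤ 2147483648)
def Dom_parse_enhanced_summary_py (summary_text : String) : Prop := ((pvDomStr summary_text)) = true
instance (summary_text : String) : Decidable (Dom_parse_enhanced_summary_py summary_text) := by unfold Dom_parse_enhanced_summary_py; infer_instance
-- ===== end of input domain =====

-- B replaces A's per-line state machine by a two-pointer segment scan over the stripped lines; same result (alternative decomposition, not claimed faster).

-- ===== PORT A =====
-- s.split('\\n') with a nonempty separator: Str.split? returns some; getD [] is exact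
-- shared helpers: the literal Python expressions both sources contain
def pvIsHeader (l : String) : Bool := PySem.Str.startswith l "##"
-- line.replace('##', '').strip().lower().replace(' ', '_')
def pvNormKey (l : String) : String :=
  PySem.Str.replace (PySem.Str.lower (PySem.Str.strip (PySem.Str.replace l "##" ""))) " " "_"
-- Python truthiness of `current_section` (None or a str)
def pvTruthy (cs : Option String) : Bool :=
  match cs with
  | none => false
  | some s => !(s == "")

-- the body of A's for-loop, one line at a time
def pvAStep (st : PySem.Dict String String × Option String × List String) (line0 : String) :
    PySem.Dict String String × Option String × List String :=
  let line := PySem.Str.strip line0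
  let (d, cs, cc) := st
  if pvIsHeader line then
    let d' := if pvTruthy cs then d.insert (cs.getD "") (PySem.Str.join "\n" cc) else d
    (d', some (pvNormKey line), ([] : List String))
  else if !(line == "") && pvTruthy cs then
    (d, cs, cc ++ [line])
  else
    (d, cs, cc)

def parse_enhanced_summary_py (summary_text : String) : List (String × String) :=
  let st := ((PySem.Str.split? summary_text "\n").getD []).foldl pvAStep
      ((PySem.Dict.empty : PySem.Dict String String), (none : Option String), ([] : List String))
  let (d, cs, cc) := st
  -- save last section
  let d := if pvTruthy cs then d.insert (cs.getD "") (PySem.Str.join "\n" cc) else d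
  d.items

-- ===== PORT B =====
-- inner while: j advances to the next header (or n); lines[j] is in range whenever read (j < n), so getD is exact
def pvBFind (lines : List String) (n j : Nat) : Nat :=
  if j < n ∧ ¬ pvIsHeader (lines.getD j "") then pvBFind lines n (j + 1) else j
termination_by n - j
decreasing_by omega

-- termination lemma for the outer loop (the inner scan never moves backwards)
theorem pvBFind_ge (lines : List String) (n j : Nat) : j ≤ pvBFind lines n j := by
  fun_induction pvBFind lines n j with
  | case1 j h ih => omega
  | case2 j h => omega

-- outer while of Source B; lines[i+1:j] with 0 ≤ i+1 ≤ j is (drop (i+1)).take (j-(i+1)) (PySem.List.slice_natCast)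
def pvBLoop (lines : List String) (n i : Nat) (sections : PySem.Dict String String) :
    PySem.Dict String String :=
  if _h : i < n then
    if ¬ pvIsHeader (lines.getD i "") then pvBLoop lines n (i + 1) sections
    else
      let key := pvNormKey (lines.getD i "")
      let j := pvBFind lines n (i + 1)
      let sections :=
        if !(key == "") then
          sections.insert key
            (PySem.Str.join "\n" (((lines.drop (i + 1)).take (j - (i + 1))).filter (fun l => !(l == ""))))
        else sections
      pvBLoop lines n j sections
  else sections
termination_by n - i
decreasing_by
  · omega
  · have := pvBFind_ge lines n (i + 1); omega

def parse_enhanced_summary_py_alt (summary_text : String) : List (String × String) :=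
  let lines := ((PySem.Str.split? summary_text "\n").getD []).map PySem.Str.strip
  (pvBLoop lines lines.length 0 PySem.Dict.empty).items

-- ===== PRECONDITION & SPEC =====
def Spec_parse_enhanced_summary_py (summary_text : String) (out : List (String × String)) : Prop := out = parse_enhanced_summary_py_alt summary_text
instance (summary_text : String) (out : List (String × String)) : Decidable (Spec_parse_enhanced_summary_py summary_text out) := by unfold Spec_parse_enhanced_summary_py; infer_instance

-- ===== CLAIM (what is proved, stated in full; the proofs are below) =====
def Claim_equal_parse_enhanced_summary_py : Prop := ∀ (summary_text : String), Dom_parse_enhanced_summary_py summary_text → Spec_parse_enhanced_summary_py summary_text (parse_enhanced_summary_py summary_text)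

-- ===== LEMMAS AND PROOFS =====
-- common spec: the (key, content) entries, one per header line, in order
def pvEnts : List String → List (String × String)
  | [] => []
  | l :: ls =>
    if pvIsHeader l then
      (if !(pvNormKey l == "") then
        [(pvNormKey l, PySem.Str.join "\n" ((ls.takeWhile (fun x => !pvIsHeader x)).filter (fun x => !(x == ""))))]
      else []) ++ pvEnts (ls.dropWhile (fun x => !pvIsHeader x))
    else pvEnts ls
termination_by ls => ls.length
decreasing_by
  · have := List.length_dropWhile_le (fun x => !pvIsHeader x) ls
    simp at this ⊢; omega
  · simp

def pvInsAll (d : PySem.Dict String String) (es : List (String × String)) : PySem.Dict String String :=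
  es.foldl (fun d e => d.insert e.1 e.2) d

theorem pvEnts_skip (ls : List String) :
    pvEnts (ls.dropWhile (fun x => !pvIsHeader x)) = pvEnts ls := by
  induction ls with
  | nil => simp
  | cons l ls ih =>
    by_cases h : pvIsHeader l
    · simp [List.dropWhile_cons, h]
    · simp [List.dropWhile_cons, h, pvEnts, ih]

theorem pvInsAll_append (d : PySem.Dict String String) (es fs : List (String × String)) :
    pvInsAll d (es ++ fs) = pvInsAll (pvInsAll d es) fs := by
  simp [pvInsAll, List.foldl_append]

-- ===== A side =====
-- A's fold followed by the final save, over ALREADY-STRIPPED lines (no strip in the step)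
def pvAStep' (st : PySem.Dict String String × Option String × List String) (line : String) :
    PySem.Dict String String × Option String × List String :=
  let (d, cs, cc) := st
  if pvIsHeader line then
    let d' := if pvTruthy cs then d.insert (cs.getD "") (PySem.Str.join "\n" cc) else d
    (d', some (pvNormKey line), ([] : List String))
  else if !(line == "") && pvTruthy cs then
    (d, cs, cc ++ [line])
  else
    (d, cs, cc)

def pvAFin (ls : List String) (d : PySem.Dict String String) (cs : Option String)
    (cc : List String) : PySem.Dict String String :=
  let (d', cs', cc') := ls.foldl pvAStep' (d, cs, cc)
  if pvTruthy cs' then d'.insert (cs'.getD "") (PySem.Str.join "\n" cc') else d'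

theorem pvAStep_eq (st : PySem.Dict String String × Option String × List String) (l : String) :
    pvAStep st l = pvAStep' st (PySem.Str.strip l) := by
  cases st with
  | mk d r => cases r; rfl

theorem pvAFin_cons (l : String) (ls : List String) (d : PySem.Dict String String)
    (cs : Option String) (cc : List String) :
    pvAFin (l :: ls) d cs cc =
      pvAFin ls (pvAStep' (d, cs, cc) l).1 (pvAStep' (d, cs, cc) l).2.1
        (pvAStep' (d, cs, cc) l).2.2 := by
  simp [pvAFin]

theorem pvAFin_spec (ls : List String) :
    ∀ (d : PySem.Dict String String) (cs : Option String) (cc : List String),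
      pvAFin ls d cs cc =
        if pvTruthy cs then
          pvInsAll
            (d.insert (cs.getD "")
              (PySem.Str.join "\n" (cc ++ (ls.takeWhile (fun x => !pvIsHeader x)).filter (fun x => !(x == "")))))
            (pvEnts (ls.dropWhile (fun x => !pvIsHeader x)))
        else pvInsAll d (pvEnts ls) := by
  induction ls with
  | nil =>
    intro d cs cc
    by_cases hT : pvTruthy cs = true
    · simp [pvAFin, pvEnts, pvInsAll, hT]
    · simp [pvAFin, pvEnts, pvInsAll, hT]
  | cons l ls ih =>
    intro d cs cc
    rw [pvAFin_cons]
    by_cases hl : pvIsHeader l = true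
    · have hstep : pvAStep' (d, cs, cc) l =
          ((if pvTruthy cs then d.insert (cs.getD "") (PySem.Str.join "\n" cc) else d),
            some (pvNormKey l), ([] : List String)) := by
        simp [pvAStep', hl]
      rw [hstep]
      rw [ih]
      have hdw : (l :: ls).dropWhile (fun x => !pvIsHeader x) = l :: ls := by
        simp [List.dropWhile_cons, hl]
      have htw : (l :: ls).takeWhile (fun x => !pvIsHeader x) = [] := by
        simp [List.takeWhile_cons, hl]
      have hents : pvEnts (l :: ls) =
          (if !(pvNormKey l == "") then
            [(pvNormKey l,
              PySem.Str.join "\n" ((ls.takeWhile (fun x => !pvIsHeader x)).filter (fun x => !(x == ""))))]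
          else []) ++ pvEnts (ls.dropWhile (fun x => !pvIsHeader x)) := by
        rw [pvEnts, if_pos hl]
      rw [hdw, htw, hents]
      by_cases hk : pvNormKey l = ""
      · have hTk : pvTruthy (some (pvNormKey l)) = false := by simp [pvTruthy, hk]
        rw [hTk]
        simp only [Bool.false_eq_true, if_false, hk]
        simp [pvEnts_skip]
        by_cases hT : pvTruthy cs = true <;> simp [hT]
      · have hTk : pvTruthy (some (pvNormKey l)) = true := by simp [pvTruthy, hk]
        rw [hTk]
        simp only [if_pos rfl]
        have : (!(pvNormKey l == "")) = true := by simp [hk]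
        rw [this]
        by_cases hT : pvTruthy cs = true <;>
          simp [hT, pvInsAll_append, pvInsAll, Option.getD]
    · have hdw : (l :: ls).dropWhile (fun x => !pvIsHeader x) =
          ls.dropWhile (fun x => !pvIsHeader x) := by
        simp [List.dropWhile_cons, hl]
      have htw : (l :: ls).takeWhile (fun x => !pvIsHeader x) =
          l :: ls.takeWhile (fun x => !pvIsHeader x) := by
        simp [List.takeWhile_cons, hl]
      have hents : pvEnts (l :: ls) = pvEnts ls := by
        rw [pvEnts, if_neg (by simpa using hl)]
      have hih : pvIsHeader l = false := by simpa using hl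
      by_cases hT : pvTruthy cs = true
      · by_cases he : l = ""
        · have hstep : pvAStep' (d, cs, cc) l = (d, cs, cc) := by
            simp [pvAStep', he, show pvIsHeader "" = false by decide]
          rw [hstep, ih, hdw, htw, hents]
          simp [hT, he]
        · have hstep : pvAStep' (d, cs, cc) l = (d, cs, cc ++ [l]) := by
            simp [pvAStep', hih, he, hT]
          rw [hstep, ih, hdw, htw, hents]
          simp [hT, he]
      · have hstep : pvAStep' (d, cs, cc) l = (d, cs, cc) := by
          simp [pvAStep', hih, hT]
        rw [hstep, ih, hdw, htw, hents]
        simp [hT]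

-- ===== B side =====
theorem pvBFind_le (lines : List String) (n j : Nat) (h : j ≤ n) : pvBFind lines n j ≤ n := by
  fun_induction pvBFind lines n j with
  | case1 j h ih => exact ih (by omega)
  | case2 j h => omega

theorem pvBFind_spec (lines : List String) (n j : Nat) (h : j ≤ n) (hn : n = lines.length) :
    pvBFind lines n j = j + ((lines.drop j).takeWhile (fun x => !pvIsHeader x)).length := by
  fun_induction pvBFind lines n j with
  | case1 j hc ih =>
    obtain ⟨hjn, hhd⟩ := hc
    have hlt : j < lines.length := by omega
    have hg : lines.getD j "" = lines[j] := by
      simp [List.getD_eq_getElem?_getD, List.getElem?_eq_getElem hlt]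
    rw [hg] at hhd
    have hb : (!pvIsHeader lines[j]) = true := by simpa using hhd
    rw [ih (by omega), List.drop_eq_getElem_cons hlt, List.takeWhile_cons, hb]
    simp
    omega
  | case2 j hc =>
    rcases Decidable.not_and_iff_not_or_not.mp hc with hjn | hhd
    · have hje : j = n := by omega
      subst hje hn
      simp [List.drop_length]
    · have hp : pvIsHeader (lines.getD j "") = true := by
        by_cases hx : pvIsHeader (lines.getD j "") = true
        · exact hx
        · exact absurd hx (by simpa using hhd)
      by_cases hlt : j < lines.length
      · have hg : lines.getD j "" = lines[j] := by
          simp [List.getD_eq_getElem?_getD, List.getElem?_eq_getElem hlt]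
        rw [hg] at hp
        rw [List.drop_eq_getElem_cons hlt, List.takeWhile_cons, hp]
        simp
      · have hg : lines.getD j "" = "" := by
          simp [List.getD_eq_getElem?_getD, List.getElem?_eq_none (by omega : lines.length ≤ j)]
        rw [hg] at hp
        exact absurd hp (by decide)

theorem pvDropWhile_eq {α : Type} (p : α → Bool) (xs : List α) :
    xs.dropWhile p = xs.drop (xs.takeWhile p).length := by
  induction xs with
  | nil => simp
  | cons x xs ih =>
    by_cases hx : p x
    · simp [List.dropWhile_cons, List.takeWhile_cons, hx, ih]
    · simp [List.dropWhile_cons, List.takeWhile_cons, hx]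

theorem pvTake_takeWhile {α : Type} (p : α → Bool) (xs : List α) :
    xs.take (xs.takeWhile p).length = xs.takeWhile p :=
  (List.prefix_iff_eq_take.mp (List.takeWhile_prefix p)).symm

set_option maxHeartbeats 1000000 in
theorem pvBLoop_spec (lines : List String) (n i : Nat) (d : PySem.Dict String String)
    (h : i ≤ n) (hn : n = lines.length) :
    pvBLoop lines n i d = pvInsAll d (pvEnts (lines.drop i)) := by
  fun_induction pvBLoop lines n i d with
  | case1 i d hlt2 hnh ih =>
    have hlt : i < lines.length := by omega
    have hg : lines.getD i "" = lines[i] := by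
      simp [List.getD_eq_getElem?_getD, List.getElem?_eq_getElem hlt]
    rw [hg] at hnh
    rw [ih (by omega), List.drop_eq_getElem_cons hlt, pvEnts]
    simp at hnh
    simp [hnh]
  | case2 i d hlt2 hdr key j sections ih =>
    have hlt : i < lines.length := by omega
    have hg : lines.getD i "" = lines[i] := by
      simp [List.getD_eq_getElem?_getD, List.getElem?_eq_getElem hlt]
    have hdr' : pvIsHeader lines[i] = true := by
      by_cases hx : pvIsHeader (lines.getD i "") = true
      · rwa [hg] at hx
      · exact absurd hx (by simpa using hdr)
    have hfind := pvBFind_spec lines n (i + 1) (by omega) hn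
    have hle := pvBFind_le lines n (i + 1) (by omega)
    rw [ih hle]
    have htake : (lines.drop (i + 1)).take (pvBFind lines n (i + 1) - (i + 1)) =
        (lines.drop (i + 1)).takeWhile (fun x => !pvIsHeader x) := by
      rw [hfind]
      simpa using pvTake_takeWhile (fun x => !pvIsHeader x) (lines.drop (i + 1))
    have hdropw : lines.drop (pvBFind lines n (i + 1)) =
        (lines.drop (i + 1)).dropWhile (fun x => !pvIsHeader x) := by
      rw [pvDropWhile_eq, List.drop_drop, hfind]
    have hj : j = pvBFind lines n (i + 1) := rfl
    have hkey : key = pvNormKey (lines.getD i "") := rfl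
    have hsec : sections =
        (if (!key == "") = true then
          d.insert key
            (PySem.Str.join "\n"
              (List.filter (fun l => !(l == ""))
                (List.take (j - (i + 1)) (List.drop (i + 1) lines))))
        else d) := rfl
    rw [hkey, hg] at hsec
    rw [hj, htake] at hsec
    rw [List.drop_eq_getElem_cons hlt, pvEnts, if_pos hdr', pvInsAll_append, hj, hdropw, hsec]
    by_cases hk : pvNormKey lines[i] = ""
    · simp [hk, pvInsAll]
    · simp [hk, pvInsAll]
  | case3 i d hge =>
    have hge' : lines.length ≤ i := by omega
    simp [List.drop_eq_nil_of_le hge', pvEnts, pvInsAll]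

-- ===== VERDICT (by name: the statement is the Claim_ definition above) =====
theorem parse_enhanced_summary_py_spec : Claim_equal_parse_enhanced_summary_py := by
  intro s _
  unfold Spec_parse_enhanced_summary_py parse_enhanced_summary_py parse_enhanced_summary_py_alt
  have hfn : pvAStep = (fun st y => pvAStep' st (PySem.Str.strip y)) := by
    funext st y
    exact pvAStep_eq st y
  rw [hfn, ← List.foldl_map]
  change (pvAFin (((PySem.Str.split? s "\n").getD []).map PySem.Str.strip)
      PySem.Dict.empty none []).items =
    (pvBLoop (((PySem.Str.split? s "\n").getD []).map PySem.Str.strip)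
      (((PySem.Str.split? s "\n").getD []).map PySem.Str.strip).length 0 PySem.Dict.empty).items
  rw [pvAFin_spec, pvBLoop_spec _ _ 0 _ (by omega) rfl]
  simp [pvTruthy]
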